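-- pv_equiv track=rewrite | github.com/Umesh94kr/Python-Begineer-to-Advance- | 100DaysPython/Day7/Love_calculator.py | calculate_love_score
-- ===== SOURCE A (Python) =====
-- def calculate_love_score(name1, name2):
--     true_count = 0
--     love_count = 0
--
--     for char in name1 + name2:
--         if char.lower() in "true":
--             true_count += 1
--
--     for char in name1 + name2:
--         if char.lower() in "love":
--             love_count += 1
--
--     combined_number = true_count * 10 + love_count
--     return combined_number
-- ===== SOURCE B (Python) =====
-- _WEIGHTS = {'t': 10, 'r': 10, 'u': 10, 'e': 11, 'l': 1, 'o': 1, 'v': 1}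
--
-- def calculate_love_score(name1, name2):
--     score = 0
--     for ch in name1 + name2:
--         score += _WEIGHTS.get(ch.lower(), 0)
--     return score
-- ===== Notes on version B (the rewrite author's own statement) =====
-- stated objective: alternative
-- what changed: B collapses A's two staged membership-filtering scans (true-count, love-count) and the final true_count*10+love_count arithmetic into one single pass that adds a precomputed per-letter weight (t/r/u=10, e=11, l/o/v=1) for each lowercased character; correctness follows because 'e' is the only letter in both sets so its weight is 10+1.
import Mathlib
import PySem

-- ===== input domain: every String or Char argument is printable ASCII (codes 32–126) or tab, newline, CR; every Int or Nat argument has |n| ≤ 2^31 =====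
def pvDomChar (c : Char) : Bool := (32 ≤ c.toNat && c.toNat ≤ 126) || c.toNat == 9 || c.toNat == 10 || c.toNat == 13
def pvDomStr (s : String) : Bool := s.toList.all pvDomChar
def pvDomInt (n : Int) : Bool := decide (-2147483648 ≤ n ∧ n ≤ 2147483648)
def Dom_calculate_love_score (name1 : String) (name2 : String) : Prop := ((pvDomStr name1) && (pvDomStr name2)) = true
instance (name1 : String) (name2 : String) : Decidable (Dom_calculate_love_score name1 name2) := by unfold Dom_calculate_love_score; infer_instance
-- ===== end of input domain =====

-- B replaces A's two staged membership scans plus final *10 arithmetic by one single pass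
-- adding a precomputed per-letter weight (t/r/u=10, e=11, l/o/v=1) per lowercased char (alternative).

-- ===== PORT A =====
-- char.lower() in "true": the substring test on the 1-char string char.lower() is exactly membership of the lowered char.
def calculate_love_score (name1 : String) (name2 : String) : Int :=
  let true_count : Int := (name1 ++ name2).toList.foldl
    (fun acc char => if "true".toList.contains (PySem.Chars.lowerChar char) then acc + 1 else acc) 0
  let love_count : Int := (name1 ++ name2).toList.foldl
    (fun acc char => if "love".toList.contains (PySem.Chars.lowerChar char) then acc + 1 else acc) 0
  true_count * 10 + love_count

-- ===== PORT B =====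
def pvWeights : PySem.Dict Char Int :=
  PySem.Dict.ofList [('t', 10), ('r', 10), ('u', 10), ('e', 11), ('l', 1), ('o', 1), ('v', 1)]

def calculate_love_score_alt (name1 : String) (name2 : String) : Int :=
  (name1 ++ name2).toList.foldl
    (fun score ch => score + pvWeights.getD (PySem.Chars.lowerChar ch) 0) 0

-- ===== PRECONDITION & SPEC =====
def Spec_calculate_love_score (name1 : String) (name2 : String) (out : Int) : Prop := out = calculate_love_score_alt name1 name2
instance (name1 : String) (name2 : String) (out : Int) : Decidable (Spec_calculate_love_score name1 name2 out) := by unfold Spec_calculate_love_score; infer_instance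

-- ===== CLAIM (what is proved, stated in full; the proofs are below) =====
def Claim_equal_calculate_love_score : Prop := ∀ (name1 : String) (name2 : String), Dom_calculate_love_score name1 name2 → Spec_calculate_love_score name1 name2 (calculate_love_score name1 name2)

-- ===== LEMMAS AND PROOFS =====

-- The per-character weight is exactly 10·[lowered char ∈ "true"] + [lowered char ∈ "love"].
theorem weight_eq (d : Char) :
    pvWeights.getD d 0
      = (if "true".toList.contains d then (10 : Int) else 0)
        + (if "love".toList.contains d then (1 : Int) else 0) := by
  by_cases h : d ∈ (['t', 'r', 'u', 'e', 'l', 'o', 'v'] : List Char)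
  · fin_cases h <;> decide
  · simp only [List.mem_cons, List.not_mem_nil, or_false, not_or] at h
    obtain ⟨h1, h2, h3, h4, h5, h6, h7⟩ := h
    have hW : pvWeights = PySem.Dict.mk [('t', 10), ('r', 10), ('u', 10), ('e', 11), ('l', 1), ('o', 1), ('v', 1)] := rfl
    rw [hW]
    simp only [PySem.Dict.getD, PySem.Dict.get?_mk_cons]
    simp [PySem.Dict.get?, Ne.symm h1, Ne.symm h2, Ne.symm h3, Ne.symm h4,
      Ne.symm h5, Ne.symm h6, Ne.symm h7, h1, h2, h3, h4, h5, h6, h7]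

-- Fusing the two counting folds into the single weighted fold, generalizing the accumulators.
theorem fold_fuse (s : List Char) (a b : Int) :
    (s.foldl (fun acc char => if "true".toList.contains (PySem.Chars.lowerChar char) then acc + 1 else acc) a) * 10
      + s.foldl (fun acc char => if "love".toList.contains (PySem.Chars.lowerChar char) then acc + 1 else acc) b
    = s.foldl (fun score ch => score + pvWeights.getD (PySem.Chars.lowerChar ch) 0) (a * 10 + b) := by
  induction s generalizing a b with
  | nil => rfl
  | cons c s ih =>
    simp only [List.foldl_cons, weight_eq (PySem.Chars.lowerChar c)]
    split_ifs with h1 h2 h2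
    · convert ih (a + 1) (b + 1) using 2; ring
    · convert ih (a + 1) b using 2; ring
    · convert ih a (b + 1) using 2; ring
    · convert ih a b using 2; ring

-- ===== VERDICT (by name: the statement is the Claim_ definition above) =====
theorem calculate_love_score_spec : Claim_equal_calculate_love_score := by
  intro name1 name2 _
  show calculate_love_score name1 name2 = calculate_love_score_alt name1 name2
  unfold calculate_love_score calculate_love_score_alt
  have := fold_fuse (name1 ++ name2).toList 0 0
  simpa using this
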